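-- pv_equiv track=rewrite | github.com/hyeonjun/AlgorithmTest | Algorithm_Study/CodingTest_Practice/BaekJoon_1920.py | solution
-- ===== SOURCE A (Python) =====
-- def solution(n,arr,m, find):
--     answer = []
--     for f in find:
--         if f in arr:
--             answer.append(1)
--         else:
--             answer.append(0)
--     return answer
--     pass
-- ===== SOURCE B (Python) =====
-- def solution(n, arr, m, find):
--     s = sorted(arr)  # sorted copy; arr is not mutated
--     answer = []
--     for f in find:
--         lo, hi = 0, len(s) - 1
--         found = 0
--         while lo <= hi:
--             mid = (lo + hi) // 2
--             if s[mid] == f: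
--                 found = 1
--                 break
--             elif s[mid] < f:
--                 lo = mid + 1
--             else:
--                 hi = mid - 1
--         answer.append(found)
--     return answer
-- ===== Notes on version B (the rewrite author's own statement) =====
-- stated objective: faster
-- what changed: Replaces the per-query linear membership scan with a sorted copy of arr plus an explicit binary search per query.
import Mathlib
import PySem

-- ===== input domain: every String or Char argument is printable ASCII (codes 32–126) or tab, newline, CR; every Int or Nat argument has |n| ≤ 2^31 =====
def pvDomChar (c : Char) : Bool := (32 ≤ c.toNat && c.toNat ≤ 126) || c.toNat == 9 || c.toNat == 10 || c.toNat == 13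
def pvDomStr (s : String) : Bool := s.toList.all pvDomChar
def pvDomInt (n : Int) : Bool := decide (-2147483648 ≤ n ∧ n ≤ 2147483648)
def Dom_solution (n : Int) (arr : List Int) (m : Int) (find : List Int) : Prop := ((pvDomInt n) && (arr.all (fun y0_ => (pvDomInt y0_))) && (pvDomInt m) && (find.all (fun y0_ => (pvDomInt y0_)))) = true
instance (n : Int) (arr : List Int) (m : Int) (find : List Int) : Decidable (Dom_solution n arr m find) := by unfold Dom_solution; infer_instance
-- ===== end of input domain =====

-- B replaces A's per-query linear membership scan by a sorted copy of arr plus an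
-- explicit binary search per query (arr itself is not mutated by either program).


-- ===== PORT A =====
def solution (n : Int) (arr : List Int) (m : Int) (find : List Int) : List Int :=
  find.foldl (fun answer f => answer ++ [if f ∈ arr then (1 : Int) else 0]) []

-- ===== PORT B =====
-- the while-loop of Source B: lo/hi indices over the sorted list s; the `none` branch of
-- the element access is unreachable from solution_alt's call (0 ≤ lo ≤ mid ≤ hi ≤ len-1)
def bsearchLoop (s : List Int) (f : Int) (lo hi : Int) : Int :=
  if h : lo ≤ hi then
    -- mid = (lo + hi) // 2, written inline at each use
    match PySem.List.pyGet? s (PySem.Int.floordiv (lo + hi) 2) with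
    | some v =>
      if v = f then 1
      else if v < f then bsearchLoop s f (PySem.Int.floordiv (lo + hi) 2 + 1) hi
      else bsearchLoop s f lo (PySem.Int.floordiv (lo + hi) 2 - 1)
    | none => 0
  else 0
termination_by (hi + 1 - lo).toNat
decreasing_by
  all_goals
    have hb := PySem.Int.floordiv_two_mid_bounds h
    omega

def solution_alt (n : Int) (arr : List Int) (m : Int) (find : List Int) : List Int :=
  let s := PySem.List.sorted arr (fun x => x) false
  find.foldl (fun answer f => answer ++ [bsearchLoop s f 0 ((s.length : Int) - 1)]) []

-- ===== PRECONDITION & SPEC =====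
def Spec_solution (n : Int) (arr : List Int) (m : Int) (find : List Int) (out : List Int) : Prop := out = solution_alt n arr m find
instance (n : Int) (arr : List Int) (m : Int) (find : List Int) (out : List Int) : Decidable (Spec_solution n arr m find out) := by unfold Spec_solution; infer_instance

-- ===== CLAIM (what is proved, stated in full; the proofs are below) =====
def Claim_equal_solution : Prop := ∀ (n : Int) (arr : List Int) (m : Int) (find : List Int), Dom_solution n arr m find → Spec_solution n arr m find (solution n arr m find)

-- ===== LEMMAS AND PROOFS =====

lemma pairwise_getElem_mono (s : List Int) (hs : List.Pairwise (· ≤ ·) s)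
    {i j : ℕ} (hij : i ≤ j) (hj : j < s.length) : s[i]'(by omega) ≤ s[j] := by
  rcases Nat.lt_or_eq_of_le hij with h | h
  · exact (List.pairwise_iff_getElem.mp hs) i j (by omega) hj h
  · subst h; exact le_refl _

lemma bsearch_eq (s : List Int) (f : Int) (hs : List.Pairwise (· ≤ ·) s) :
    ∀ (k : ℕ) (lo hi : Int), (hi + 1 - lo).toNat = k → 0 ≤ lo → hi ≤ (s.length : Int) - 1 →
      (bsearchLoop s f lo hi = 1 ∨ bsearchLoop s f lo hi = 0) ∧
      (bsearchLoop s f lo hi = 1 ↔ ∃ i : ℕ, lo ≤ (i : Int) ∧ (i : Int) ≤ hi ∧ s[i]? = some f) := by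
  intro k
  induction k using Nat.strong_induction_on with
  | _ k ih =>
    intro lo hi hk hlo hhi
    rw [bsearchLoop]
    by_cases h : lo ≤ hi
    · rw [dif_pos h]
      obtain ⟨hml, hmr⟩ := PySem.Int.floordiv_two_mid_bounds h
      set mid := PySem.Int.floordiv (lo + hi) 2 with hmid
      have hmid0 : 0 ≤ mid := le_trans hlo hml
      have hmidlt : mid.toNat < s.length := by omega
      have hget : PySem.List.pyGet? s mid = some (s[mid.toNat]'hmidlt) := by
        rw [PySem.List.pyGet?_of_nonneg s hmid0, List.getElem?_eq_getElem hmidlt]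
      rw [hget]
      dsimp only
      set v := s[mid.toNat]'hmidlt with hv
      by_cases hvf : v = f
      · rw [if_pos hvf]
        refine ⟨Or.inl rfl, ?_⟩
        simp only [true_iff]
        exact ⟨mid.toNat, by omega, by omega, by rw [List.getElem?_eq_getElem hmidlt, ← hv, hvf]⟩
      · rw [if_neg hvf]
        by_cases hlt : v < f
        · rw [if_pos hlt]
          obtain ⟨hvals, hiff⟩ :=
            ih (hi + 1 - (mid + 1)).toNat (by omega) (mid + 1) hi rfl (by omega) hhi
          refine ⟨hvals, hiff.trans ?_⟩
          constructor
          · rintro ⟨i, h1, h2, h3⟩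
            exact ⟨i, by omega, h2, h3⟩
          · rintro ⟨i, h1, h2, h3⟩
            refine ⟨i, ?_, h2, h3⟩
            by_contra hc
            have hile : i ≤ mid.toNat := by omega
            have hilt : i < s.length := by omega
            have := pairwise_getElem_mono s hs hile hmidlt
            rw [List.getElem?_eq_getElem hilt] at h3
            have : s[i]'hilt = f := by injection h3
            omega
        · rw [if_neg hlt]
          obtain ⟨hvals, hiff⟩ :=
            ih (mid - 1 + 1 - lo).toNat (by omega) lo (mid - 1) rfl hlo (by omega)
          refine ⟨hvals, hiff.trans ?_⟩
          constructor
          · rintro ⟨i, h1, h2, h3⟩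
            exact ⟨i, h1, by omega, h3⟩
          · rintro ⟨i, h1, h2, h3⟩
            refine ⟨i, h1, ?_, h3⟩
            by_contra hc
            have hile : mid.toNat ≤ i := by omega
            have hilt : i < s.length := by
              have := List.getElem?_eq_some_iff.mp h3
              omega
            have := pairwise_getElem_mono s hs hile hilt
            rw [List.getElem?_eq_getElem hilt] at h3
            have : s[i]'hilt = f := by injection h3
            omega
    · rw [dif_neg h]
      refine ⟨Or.inr rfl, ?_⟩
      constructor
      · intro h01
        exact absurd h01 (by norm_num)
      · rintro ⟨i, h1, h2, _⟩
        omega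

lemma bsearch_full (arr : List Int) (f : Int) :
    bsearchLoop (PySem.List.sorted arr (fun x => x) false) f 0
        (((PySem.List.sorted arr (fun x => x) false).length : Int) - 1) =
      if f ∈ arr then 1 else 0 := by
  set s := PySem.List.sorted arr (fun x => x) false with hsdef
  have hs : List.Pairwise (· ≤ ·) s := PySem.List.sorted_pairwise arr (fun x => x)
  obtain ⟨hvals, hiff⟩ :=
    bsearch_eq s f hs _ 0 ((s.length : Int) - 1) rfl (by omega) (by omega)
  have hcond : (∃ i : ℕ, (0:Int) ≤ i ∧ (i : Int) ≤ (s.length : Int) - 1 ∧ s[i]? = some f) ↔ f ∈ arr := by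
    constructor
    · rintro ⟨i, _, _, h3⟩
      have : f ∈ s := List.mem_of_getElem? h3
      rwa [hsdef, PySem.List.mem_sorted] at this
    · intro hf
      have hf' : f ∈ s := by rw [hsdef, PySem.List.mem_sorted]; exact hf
      obtain ⟨i, hi, hv⟩ := List.getElem_of_mem hf'
      exact ⟨i, by omega, by omega, by rw [List.getElem?_eq_getElem hi, hv]⟩
  by_cases hf : f ∈ arr
  · rw [if_pos hf]
    exact hiff.mpr (hcond.mpr hf)
  · rw [if_neg hf]
    rcases hvals with h1 | h0
    · exact absurd (hcond.mp (hiff.mp h1)) hf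
    · exact h0

-- ===== VERDICT (by name: the statement is the Claim_ definition above) =====
theorem solution_spec : Claim_equal_solution := by
  intro n arr m find _
  unfold Spec_solution solution solution_alt
  simp only [PySem.List.foldl_append_singleton_eq_map, List.nil_append]
  apply List.map_congr_left
  intro f _
  exact (bsearch_full arr f).symm
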